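-- pv_equiv track=rewrite | github.com/Error-In-Code/Entropy-Calculator | Entropy.py | find_chars
-- ===== SOURCE A (Python) =====
-- def find_chars(password):
--     char_amount = 0
--     char_sets = [False, False, False, False]
--     char_nums = [26, 26, 10, 32]
--     for i in password:
--         if i.islower():
--             char_sets[0] = True
--         if i.isupper():
--             char_sets[1] = True
--         if i.isdigit():
--             char_sets[2] = True
--         if not i.isalnum() and i.isascii():
--             char_sets[3] = True
--
--     for x in range(4):
--         if char_sets[x]:
--             char_amount += char_nums[x]
--
--     return len(password), char_amount
-- ===== SOURCE B (Python) =====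
-- def find_chars(password):
--     char_amount = 0
--     if any(c.islower() for c in password):
--         char_amount += 26
--     if any(c.isupper() for c in password):
--         char_amount += 26
--     if any(c.isdigit() for c in password):
--         char_amount += 10
--     if any(not c.isalnum() and c.isascii() for c in password):
--         char_amount += 32
--     return len(password), char_amount
-- ===== Notes on version B (the rewrite author's own statement) =====
-- stated objective: idiomatic
-- what changed: Replaces the boolean flag array plus the second range(4) summing loop with four independent short-circuiting any() scans that add each character-set size directly.
import Mathlib
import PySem

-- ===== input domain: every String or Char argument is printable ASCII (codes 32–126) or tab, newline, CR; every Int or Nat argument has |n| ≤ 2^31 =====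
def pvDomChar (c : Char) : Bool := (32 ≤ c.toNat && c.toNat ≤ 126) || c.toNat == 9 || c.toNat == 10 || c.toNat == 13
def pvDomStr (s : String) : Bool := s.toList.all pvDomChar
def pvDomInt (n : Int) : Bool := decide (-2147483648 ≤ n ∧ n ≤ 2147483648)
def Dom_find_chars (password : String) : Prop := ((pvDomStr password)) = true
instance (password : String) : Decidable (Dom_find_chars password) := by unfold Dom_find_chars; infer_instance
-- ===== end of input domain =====

-- B replaces A's boolean-flag array and second summing loop with four independent any() scans (idiomatic; same cost).

-- ===== PORT A =====
-- 'i.isascii()' has no PySem primitive; ported exactly as c.toNat < 128 (Python: code point < 128).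
def pvSymA (c : Char) : Bool := !PySem.Chars.isalnum c && decide (c.toNat < 128)

def find_chars (password : String) : Int × Int :=
  let char_sets : List Bool := [false, false, false, false]
  let char_nums : List Int := [26, 26, 10, 32]
  let char_sets := password.toList.foldl (fun (cs : List Bool) i =>
    let cs := if PySem.Chars.islower i then cs.set 0 true else cs
    let cs := if PySem.Chars.isupper i then cs.set 1 true else cs
    let cs := if PySem.Chars.isdigit i then cs.set 2 true else cs
    let cs := if pvSymA i then cs.set 3 true else cs
    cs) char_sets
  let char_amount : Int := (PySem.List.pyRange 0 4 1).foldl (fun a x =>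
    if (PySem.List.pyGet? char_sets x).getD false then
      a + (PySem.List.pyGet? char_nums x).getD 0
    else a) 0
  (PySem.Str.len password, char_amount)

-- ===== PORT B =====
def find_chars_alt (password : String) : Int × Int :=
  let l := password.toList
  let char_amount : Int :=
    (if l.any PySem.Chars.islower then 26 else 0) +
    ((if l.any PySem.Chars.isupper then 26 else 0) +
     ((if l.any PySem.Chars.isdigit then 10 else 0) +
      (if l.any (fun c => !PySem.Chars.isalnum c && decide (c.toNat < 128)) then 32 else 0)))
  (PySem.Str.len password, char_amount)

-- ===== PRECONDITION & SPEC =====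
def Spec_find_chars (password : String) (out : Int × Int) : Prop := out = find_chars_alt password
instance (password : String) (out : Int × Int) : Decidable (Spec_find_chars password out) := by unfold Spec_find_chars; infer_instance

-- ===== CLAIM (what is proved, stated in full; the proofs are below) =====
def Claim_equal_find_chars : Prop := ∀ (password : String), Dom_find_chars password → Spec_find_chars password (find_chars password)

-- ===== LEMMAS AND PROOFS =====

-- the flag array after A's first loop is exactly the four any()-results, componentwise or-ed onto the start state
theorem find_chars_fold_eq (l : List Char) (a b c d : Bool) :
    l.foldl (fun (cs : List Bool) i =>
      let cs := if PySem.Chars.islower i then cs.set 0 true else cs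
      let cs := if PySem.Chars.isupper i then cs.set 1 true else cs
      let cs := if PySem.Chars.isdigit i then cs.set 2 true else cs
      let cs := if pvSymA i then cs.set 3 true else cs
      cs) [a, b, c, d]
    = [a || l.any PySem.Chars.islower, b || l.any PySem.Chars.isupper,
       c || l.any PySem.Chars.isdigit, d || l.any pvSymA] := by
  induction l generalizing a b c d with
  | nil => simp
  | cons x xs ih =>
    simp only [List.foldl_cons, List.any_cons]
    cases hlo : PySem.Chars.islower x <;> cases hup : PySem.Chars.isupper x <;>
      cases hdi : PySem.Chars.isdigit x <;> cases hsy : pvSymA x <;>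
      simp [List.set, ih]

set_option maxRecDepth 4000 in
theorem find_chars_spec' (password : String) : find_chars password = find_chars_alt password := by
  simp only [find_chars, find_chars_alt]
  rw [find_chars_fold_eq]
  simp only [Bool.false_or]
  have hr : PySem.List.pyRange 0 4 1 = [0, 1, 2, 3] := by decide
  rw [hr]
  simp only [List.foldl_cons, List.foldl_nil]
  cases password.toList.any PySem.Chars.islower <;>
    cases password.toList.any PySem.Chars.isupper <;>
    cases password.toList.any PySem.Chars.isdigit <;>
    cases h : password.toList.any pvSymA <;>
    simp [pvSymA, PySem.List.pyGet?, PySem.List.pyIdx?] at h ⊢ <;>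
    first
      | exact h
      | (rw [if_pos h]; norm_num)
      | (rw [if_neg (by push Not; exact fun x hx ha => le_of_not_gt fun hl => absurd (h x hx ha) (by omega))]; norm_num)

-- ===== VERDICT (by name: the statement is the Claim_ definition above) =====
theorem find_chars_spec : Claim_equal_find_chars := by
  intro password _
  exact find_chars_spec' password
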